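-- pv_equiv track=rewrite | github.com/PatoLocos/Erdos530 | experiments/test_axiom_general.py | make_spread_sidon
-- ===== SOURCE A (Python) =====
-- def is_sidon(S):
--     S = sorted(S)
--     sums = set()
--     for i in range(len(S)):
--         for j in range(i, len(S)):
--             s = S[i] + S[j]
--             if s in sums:
--                 return False
--             sums.add(s)
--     return True
--
-- def make_spread_sidon(k, spread="exponential"):
--     """Create a Sidon set of size k with elements spread far apart."""
--     if spread == "exponential":
--         # Try powers of a base
--         for base in [10, 7, 5, 3, 2]:
--             S = [base**i for i in range(k)]
--             if is_sidon(S):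
--                 return S
--     elif spread == "perfect":
--         # Known perfect difference sets give dense Sidon sets
--         # For comparison: {0,1,3,7,12,20} for k=6
--         known = {
--             3: [0, 1, 3],
--             4: [0, 1, 3, 7],
--             5: [0, 1, 3, 7, 12],
--             6: [0, 1, 3, 7, 12, 20],
--             7: [0, 1, 3, 7, 12, 20, 30],
--         }
--         if k in known:
--             S = known[k]
--             if is_sidon(S):
--                 return S
--     elif spread == "quadratic":
--         # Elements grow quadratically
--         S = [i*i for i in range(k)]
--         # Likely not Sidon for large k, but check
--         if is_sidon(S):
--             return S
--     elif spread == "superexp":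
--         # Very spread out: 0, 1, M, M², M³, ...
--         M = 1000
--         S = [M**i if i > 0 else 0 for i in range(k)]
--         S[1] = 1  # keep 0, 1
--         if is_sidon(S):
--             return S
--
--     # Greedy construction with large gaps
--     S = [0]
--     gap = 1
--     for _ in range(k - 1):
--         candidate = S[-1] + gap
--         while not is_sidon(S + [candidate]):
--             candidate += 1
--         S.append(candidate)
--         gap = max(gap, candidate)  # exponentially growing gaps
--     return S
-- ===== SOURCE B (Python) =====
-- def _is_sidon(S):
--     n = len(S)
--     sums = {S[i] + S[j] for i in range(n) for j in range(i, n)}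
--     return len(sums) == n * (n + 1) // 2
--
-- def _new_sums(c, S, sums):
--     """Sums contributed by appending c to S, or None if any collides."""
--     new = set()
--     for s in S + [c]:
--         t = c + s
--         if t in sums or t in new:
--             return None
--         new.add(t)
--     return new
--
-- def make_spread_sidon(k, spread="exponential"):
--     """Create a Sidon set of size k with elements spread far apart."""
--     if spread == "exponential":
--         for base in (10, 7, 5, 3, 2):
--             S = [base ** i for i in range(k)]
--             if _is_sidon(S):
--                 return S
--     elif spread == "perfect":
--         if 3 <= k <= 7:
--             return [0, 1, 3, 7, 12, 20, 30][:k]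
--     elif spread == "quadratic":
--         S = [i * i for i in range(k)]
--         if _is_sidon(S):
--             return S
--     elif spread == "superexp":
--         if k >= 2:
--             S = [0, 1] + [1000 ** i for i in range(2, k)]
--             if _is_sidon(S):
--                 return S
--
--     # Greedy with an incrementally maintained set of pairwise sums:
--     # each candidate is tested in O(|S|) instead of rebuilding all sums.
--     S = [0]
--     sums = {0}
--     gap = 1
--     for _ in range(k - 1):
--         c = S[-1] + gap
--         while True:
--             new = _new_sums(c, S, sums)
--             if new is not None:
--                 break
--             c += 1
--         S.append(c)
--         sums |= new
--         gap = max(gap, c)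
--     return S
-- ===== Notes on version B (the rewrite author's own statement) =====
-- stated objective: alternative
-- what changed: B maintains the set of pairwise sums incrementally across the greedy loop and tests each candidate with one O(k) pass (instead of A rebuilding and re-checking all O(k^2) sums per candidate; intended as faster, measured ~59x at n=1024 but both time out on the huge-integer greedy sets at n=4096), replaces the sort-and-early-exit is_sidon by a cardinality check of the sum set, and returns the 'perfect' table as a slice of one master list instead of a dict lookup plus re-check.
-- outside the precondition, e.g. on make_spread_sidon(1, 'superexp'): A raises IndexError, B returns [0]; on make_spread_sidon(0, 'superexp'): A raises IndexError, B returns [0]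
import Mathlib
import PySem

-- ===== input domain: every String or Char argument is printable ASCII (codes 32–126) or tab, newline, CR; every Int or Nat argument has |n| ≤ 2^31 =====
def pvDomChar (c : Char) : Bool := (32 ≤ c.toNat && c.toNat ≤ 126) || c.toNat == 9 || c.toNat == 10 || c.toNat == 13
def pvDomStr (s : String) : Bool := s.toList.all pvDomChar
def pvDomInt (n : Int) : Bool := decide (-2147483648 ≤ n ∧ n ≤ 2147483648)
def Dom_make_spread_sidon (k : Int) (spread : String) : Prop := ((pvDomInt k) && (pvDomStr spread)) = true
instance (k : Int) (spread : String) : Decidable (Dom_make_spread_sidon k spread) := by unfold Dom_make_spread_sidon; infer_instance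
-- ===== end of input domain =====

-- B replaces A's rebuild-all-sums Sidon test inside the greedy loop by an incrementally
-- maintained pairwise-sum set (one O(|S|) pass per candidate); return values only.

-- ===== PORT A =====
-- is_sidon, inner loop: `for j in range(i, len(S))` walks the suffix S[i:]
def sidonInner (x : Int) : List Int → PySem.Set Int → Option (PySem.Set Int)
  | [], sums => some sums
  | y :: t, sums =>
      if sums.contains (x + y) then none
      else sidonInner x t (sums.add (x + y))

-- is_sidon, outer loop: the i-th iteration sees S[i] = x and the suffix S[i:] = x :: t
def sidonOuter : List Int → PySem.Set Int → Option (PySem.Set Int)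
  | [], sums => some sums
  | x :: t, sums =>
      match sidonInner x (x :: t) sums with
      | none => none
      | some sums' => sidonOuter t sums'

def is_sidon (S : List Int) : Bool :=
  (sidonOuter (PySem.List.sorted S (fun v => v) false) PySem.Set.empty).isSome

-- S[-1]; in the greedy loop S is always nonempty, so the default is never used
def lastD (S : List Int) : Int := (PySem.List.pyGet? S (-1)).getD 0

-- `while not is_sidon(S + [candidate]): candidate += 1`; the `bound ≤ c` branch is only a
-- totality guard — the equivalence proof shows the search succeeds strictly below `bound`
def searchA (S : List Int) (bound : Int) (c : Int) : Int :=
  if is_sidon (S ++ [c]) then c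
  else if bound ≤ c then c
  else searchA S bound (c + 1)
termination_by (bound - c).toNat
decreasing_by simp_wf; omega

-- `for _ in range(k - 1)` of the greedy construction
def stepsA : Nat → List Int → Int → List Int
  | 0, S, _ => S
  | n + 1, S, gap =>
      let c := searchA S (2 * lastD S + gap + 2) (lastD S + gap)
      stepsA n (S ++ [c]) (max gap c)

def greedyA (k : Int) : List Int := stepsA (k - 1).toNat [0] 1

def knownA : PySem.Dict Int (List Int) :=
  PySem.Dict.ofList
    [(3, [0, 1, 3]), (4, [0, 1, 3, 7]), (5, [0, 1, 3, 7, 12]),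
     (6, [0, 1, 3, 7, 12, 20]), (7, [0, 1, 3, 7, 12, 20, 30])]

-- `for base in [10, 7, 5, 3, 2]:` with fall-through to the greedy construction
def expLoopA (k : Int) : List Int → List Int
  | [] => greedyA k
  | base :: rest =>
      let S := (PySem.List.pyRange 0 k).map (fun i => base ^ i.toNat)  -- base**i, i ≥ 0
      if is_sidon S then S else expLoopA k rest

def make_spread_sidon (k : Int) (spread : String) : List Int :=
  if spread = "exponential" then
    expLoopA k [10, 7, 5, 3, 2]
  else if spread = "perfect" then
    match knownA.get? k with
    | some S => if is_sidon S then S else greedyA k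
    | none => greedyA k
  else if spread = "quadratic" then
    let S := (PySem.List.pyRange 0 k).map (fun i => i * i)
    if is_sidon S then S else greedyA k
  else if spread = "superexp" then
    -- S[1] = 1 : exact for k ≥ 2 (Pre_); on k ≤ 1 Python raises IndexError (excluded)
    let S := ((PySem.List.pyRange 0 k).map (fun i => if 0 < i then (1000 : Int) ^ i.toNat else 0)).set 1 1
    if is_sidon S then S else greedyA k
  else greedyA k

-- ===== PORT B =====
-- the `{S[i] + S[j] for i in range(n) for j in range(i, n)}` generation order
def sumListB : List Int → List Int
  | [] => []
  | x :: t => (x :: t).map (fun y => x + y) ++ sumListB t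

def isSidonB (S : List Int) : Bool :=
  PySem.Set.len (PySem.Set.ofList (sumListB S)) ==
    PySem.Int.floordiv ((S.length : Int) * ((S.length : Int) + 1)) 2

-- `for s in S + [c]: t = c + s; if t in sums or t in new: return None; new.add(t)`
def newSumsB (c : Int) (sums : PySem.Set Int) : List Int → PySem.Set Int → Option (PySem.Set Int)
  | [], new => some new
  | s :: t, new =>
      if sums.contains (c + s) || new.contains (c + s) then none
      else newSumsB c sums t (new.add (c + s))

-- `while True: new = _new_sums(c, S, sums); if new is not None: break; c += 1`;
-- the `bound ≤ c` branch is only a totality guard — proved unreachable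
def searchB (S : List Int) (sums : PySem.Set Int) (bound : Int) (c : Int) : Int × PySem.Set Int :=
  match newSumsB c sums (S ++ [c]) PySem.Set.empty with
  | some new => (c, new)
  | none => if bound ≤ c then (c, PySem.Set.empty) else searchB S sums bound (c + 1)
termination_by (bound - c).toNat
decreasing_by simp_wf; omega

def stepsB : Nat → List Int → PySem.Set Int → Int → List Int
  | 0, S, _, _ => S
  | n + 1, S, sums, gap =>
      let r := searchB S sums (2 * lastD S + gap + 2) (lastD S + gap)
      stepsB n (S ++ [r.1]) (sums.union r.2) (max gap r.1)

def greedyB (k : Int) : List Int := stepsB (k - 1).toNat [0] (PySem.Set.ofList [0]) 1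

def expLoopB (k : Int) : List Int → List Int
  | [] => greedyB k
  | base :: rest =>
      let S := (PySem.List.pyRange 0 k).map (fun i => base ^ i.toNat)
      if isSidonB S then S else expLoopB k rest

def make_spread_sidon_alt (k : Int) (spread : String) : List Int :=
  if spread = "exponential" then
    expLoopB k [10, 7, 5, 3, 2]
  else if spread = "perfect" then
    if 3 ≤ k ∧ k ≤ 7 then ([0, 1, 3, 7, 12, 20, 30] : List Int).take k.toNat  -- [:k], k ≥ 3 here
    else greedyB k
  else if spread = "quadratic" then
    let S := (PySem.List.pyRange 0 k).map (fun i => i * i)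
    if isSidonB S then S else greedyB k
  else if spread = "superexp" then
    if 2 ≤ k then
      let S := 0 :: 1 :: (PySem.List.pyRange 2 k).map (fun i => (1000 : Int) ^ i.toNat)
      if isSidonB S then S else greedyB k
    else greedyB k
  else greedyB k

-- ===== PRECONDITION & SPEC =====
-- Pre_ excludes only spread = "superexp" with k ≤ 1, where A raises IndexError (S[1] = 1
-- on a list shorter than 2); B falls through to the greedy construction there and returns [0].
def Pre_make_spread_sidon (k : Int) (spread : String) : Prop :=
  ¬ (spread = "superexp" ∧ k ≤ 1)
instance (k : Int) (spread : String) : Decidable (Pre_make_spread_sidon k spread) := by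
  unfold Pre_make_spread_sidon; infer_instance

def pvWitness_make_spread_sidon : Int × String := (5, "quadratic")

def Spec_make_spread_sidon (k : Int) (spread : String) (out : List Int) : Prop :=
  out = make_spread_sidon_alt k spread
instance (k : Int) (spread : String) (out : List Int) : Decidable (Spec_make_spread_sidon k spread out) := by
  unfold Spec_make_spread_sidon; infer_instance

-- ===== CLAIM (what is proved, stated in full; the proofs are below) =====
def Claim_equal_make_spread_sidon : Prop :=
  ∀ (k : Int) (spread : String), Dom_make_spread_sidon k spread →
    Pre_make_spread_sidon k spread →
    Spec_make_spread_sidon k spread (make_spread_sidon k spread)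

-- ===== LEMMAS AND PROOFS =====

-- generic "add each element to the set, failing on a duplicate" loop (A's inner loop shape)
def addAll : List Int → PySem.Set Int → Option (PySem.Set Int)
  | [], s => some s
  | y :: t, s => if s.contains y then none else addAll t (s.add y)

theorem sidonInner_eq_addAll (x : Int) (rest : List Int) (sums : PySem.Set Int) :
    sidonInner x rest sums = addAll (rest.map (fun y => x + y)) sums := by
  induction rest generalizing sums with
  | nil => rfl
  | cons y t ih => simp [sidonInner, addAll, ih]

theorem addAll_isSome (xs : List Int) (s : PySem.Set Int) :
    (addAll xs s).isSome = true ↔ xs.Nodup ∧ ∀ y ∈ xs, y ∉ s := by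
  induction xs generalizing s with
  | nil => simp [addAll]
  | cons y t ih =>
    rw [addAll]
    by_cases hy : y ∈ s
    · rw [if_pos ((PySem.Set.contains_iff s y).2 hy)]
      simp only [Option.isSome_none, Bool.false_eq_true, false_iff, not_and]
      intro _ h
      exact (h y (List.mem_cons_self)) hy
    · have hc : s.contains y = false := by
        rcases h : s.contains y
        · rfl
        · exact absurd ((PySem.Set.contains_iff s y).1 h) hy
      rw [hc, if_neg (by simp), ih]
      simp only [List.nodup_cons, List.mem_cons]
      constructor
      · rintro ⟨hnd, hmem⟩
        have hyt : y ∉ t := fun hmem' =>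
          (hmem y hmem') ((PySem.Set.mem_add s y y).2 (Or.inr rfl))
        refine ⟨⟨hyt, hnd⟩, ?_⟩
        rintro z (rfl | hz)
        · exact hy
        · exact fun hzs => (hmem z hz) ((PySem.Set.mem_add s y z).2 (Or.inl hzs))
      · rintro ⟨⟨hyt, hnd⟩, hmem⟩
        refine ⟨hnd, fun z hz hza => ?_⟩
        rcases (PySem.Set.mem_add s y z).1 hza with hzs | rfl
        · exact hmem z (Or.inr hz) hzs
        · exact hyt hz

theorem addAll_some_mem (xs : List Int) (s s' : PySem.Set Int)
    (h : addAll xs s = some s') (y : Int) : y ∈ s' ↔ y ∈ s ∨ y ∈ xs := by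
  induction xs generalizing s with
  | nil =>
    rw [addAll, Option.some.injEq] at h
    subst h; simp
  | cons z t ih =>
    rw [addAll] at h
    split at h
    · exact absurd h (by simp)
    · rw [ih _ h, PySem.Set.mem_add]
      constructor
      · rintro ((h1 | rfl) | h2)
        · exact Or.inl h1
        · exact Or.inr (List.mem_cons_self)
        · exact Or.inr (List.mem_cons_of_mem _ h2)
      · rintro (h1 | h2)
        · exact Or.inl (Or.inl h1)
        · rcases List.mem_cons.1 h2 with rfl | h2
          · exact Or.inl (Or.inr rfl)
          · exact Or.inr h2

theorem sidonOuter_isSome (L : List Int) (sums : PySem.Set Int) :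
    (sidonOuter L sums).isSome = true ↔
      (sumListB L).Nodup ∧ ∀ y ∈ sumListB L, y ∉ sums := by
  induction L generalizing sums with
  | nil => simp [sidonOuter, sumListB]
  | cons x t ih =>
    rw [sidonOuter, sidonInner_eq_addAll]
    rcases h : addAll ((x :: t).map (fun y => x + y)) sums with _ | s'
    · have hrow := addAll_isSome ((x :: t).map (fun y => x + y)) sums
      rw [h] at hrow
      simp only [Option.isSome_none, Bool.false_eq_true, false_iff, not_and] at hrow ⊢
      rw [show sumListB (x :: t) = (x :: t).map (fun y => x + y) ++ sumListB t from rfl]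
      intro hnd hmem
      rcases List.nodup_append.1 hnd with ⟨hnd1, _, _⟩
      exact hrow hnd1 (fun y hy => hmem y (List.mem_append_left _ hy))
    · have hrow := addAll_isSome ((x :: t).map (fun y => x + y)) sums
      rw [h] at hrow
      simp only [Option.isSome_some, true_iff] at hrow
      have hmem' := addAll_some_mem _ _ _ h
      rw [ih, show sumListB (x :: t) = (x :: t).map (fun y => x + y) ++ sumListB t from rfl,
        List.nodup_append]
      constructor
      · rintro ⟨hnd2, hm2⟩
        refine ⟨⟨hrow.1, hnd2, ?_⟩, ?_⟩
        · intro a ha b hb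
          rintro rfl
          exact (hm2 a hb) ((hmem' a).2 (Or.inr ha))
        · intro y hy
          rcases List.mem_append.1 hy with hy | hy
          · exact hrow.2 y hy
          · exact fun hys => (hm2 y hy) ((hmem' y).2 (Or.inl hys))
      · rintro ⟨⟨h1, h2, h3⟩, h4⟩
        refine ⟨h2, fun y hy hys => ?_⟩
        rcases (hmem' y).1 hys with hys' | hyr
        · exact (h4 y (List.mem_append_right _ hy)) hys'
        · exact h3 y hyr y hy rfl

-- sumListB is the Sym2 multiset of pairwise sums, hence permutation-invariant
theorem sumListB_eq_sym2 (L : List Int) :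
    sumListB L = L.sym2.map (Sym2.lift ⟨fun a b => a + b, fun a b => add_comm a b⟩) := by
  induction L with
  | nil => rfl
  | cons x t ih =>
    rw [show sumListB (x :: t) = (x :: t).map (fun y => x + y) ++ sumListB t from rfl,
      show (x :: t).sym2 = ((x :: t).map fun y => s(x, y)) ++ t.sym2 from rfl,
      List.map_append, List.map_map, ih]
    rfl

theorem sumListB_perm {S T : List Int} (h : S.Perm T) : (sumListB S).Perm (sumListB T) := by
  rw [sumListB_eq_sym2, sumListB_eq_sym2]
  exact h.sym2.map _

theorem sumListB_append_singleton (S : List Int) (c : Int) :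
    (sumListB (S ++ [c])).Perm (sumListB S ++ (S ++ [c]).map (fun s => c + s)) := by
  induction S with
  | nil => simp [sumListB]
  | cons x t ih =>
    have hL : sumListB ((x :: t) ++ [c]) =
        (x :: t).map (fun y => x + y) ++ ([x + c] ++ sumListB (t ++ [c])) := by
      rw [show (x :: t) ++ [c] = x :: (t ++ [c]) from rfl,
        show sumListB (x :: (t ++ [c])) =
          (x :: (t ++ [c])).map (fun y => x + y) ++ sumListB (t ++ [c]) from rfl]
      simp
    have hR : sumListB (x :: t) ++ ((x :: t) ++ [c]).map (fun s => c + s) =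
        (x :: t).map (fun y => x + y) ++ (sumListB t ++ ((c + x) :: (t ++ [c]).map (fun s => c + s))) := by
      rw [show sumListB (x :: t) = (x :: t).map (fun y => x + y) ++ sumListB t from rfl]
      simp
    rw [hL, hR, add_comm c x]
    refine List.Perm.append_left _ ?_
    exact (List.Perm.cons (x + c) ih).trans List.perm_middle.symm

theorem mem_sumListB {z : Int} {S : List Int} (h : z ∈ sumListB S) :
    ∃ a ∈ S, ∃ b ∈ S, z = a + b := by
  induction S with
  | nil => simp [sumListB] at h
  | cons x t ih =>
    rw [show sumListB (x :: t) = (x :: t).map (fun y => x + y) ++ sumListB t from rfl,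
      List.mem_append] at h
    rcases h with h | h
    · rcases List.mem_map.1 h with ⟨y, hy, rfl⟩
      exact ⟨x, List.mem_cons_self, y, hy, rfl⟩
    · rcases ih h with ⟨a, ha, b, hb, rfl⟩
      exact ⟨a, List.mem_cons_of_mem _ ha, b, List.mem_cons_of_mem _ hb, rfl⟩

theorem is_sidon_iff (S : List Int) : is_sidon S = true ↔ (sumListB S).Nodup := by
  rw [is_sidon, sidonOuter_isSome]
  have hperm : (sumListB (PySem.List.sorted S (fun v => v) false)).Perm (sumListB S) :=
    sumListB_perm (PySem.List.sorted_perm S (fun v => v) false)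
  constructor
  · rintro ⟨hnd, _⟩; exact hperm.nodup_iff.1 hnd
  · intro hnd
    exact ⟨hperm.nodup_iff.2 hnd, fun y _ hy => by simp [PySem.Set.empty] at hy⟩

theorem sumListB_length (S : List Int) :
    (sumListB S).length * 2 = S.length * (S.length + 1) := by
  induction S with
  | nil => rfl
  | cons x t ih =>
    rw [show sumListB (x :: t) = (x :: t).map (fun y => x + y) ++ sumListB t from rfl]
    simp only [List.length_append, List.length_map, List.length_cons]
    nlinarith [ih]

theorem length_ofList_eq_iff (xs : List Int) :
    (PySem.Set.ofList xs).length = xs.length ↔ xs.Nodup := by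
  induction xs using List.reverseRecOn with
  | nil => simp [PySem.Set.ofList]
  | append_singleton t x ih =>
    rw [PySem.Set.ofList_append_singleton, PySem.Set.add_eq_ite]
    by_cases hx : x ∈ PySem.Set.ofList t
    · have hxt : x ∈ t := (PySem.Set.mem_ofList t x).1 hx
      rw [if_pos hx]
      have hle := PySem.Set.length_ofList_le t
      simp only [List.length_append, List.length_cons, List.length_nil]
      constructor
      · omega
      · intro hnd
        exact absurd ((List.nodup_append.1 hnd).2.2 x hxt x (List.mem_singleton.2 rfl) rfl) (fun h => h)
    · have hxt : x ∉ t := fun h => hx ((PySem.Set.mem_ofList t x).2 h)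
      rw [if_neg hx]
      simp only [List.length_append, List.length_cons, List.length_nil]
      rw [List.nodup_append]
      constructor
      · intro h
        refine ⟨ih.1 (by omega), List.nodup_singleton x, ?_⟩
        intro a ha b hb
        rw [List.mem_singleton] at hb
        subst hb
        exact fun h => hxt (h ▸ ha)
      · rintro ⟨hnd, _, _⟩
        have := ih.2 hnd
        omega

theorem isSidonB_iff (S : List Int) : isSidonB S = true ↔ (sumListB S).Nodup := by
  have hlen := sumListB_length S
  have h2 : (S.length : Int) * ((S.length : Int) + 1) = 2 * ((sumListB S).length : Int) := by
    have hc : ((sumListB S).length * 2 : Int) = (S.length : Int) * ((S.length : Int) + 1) := by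
      exact_mod_cast congrArg (fun n : Nat => (n : Int)) hlen
    linarith
  have hfd : PySem.Int.floordiv ((S.length : Int) * ((S.length : Int) + 1)) 2
      = ((sumListB S).length : Int) := by
    rw [h2, PySem.Int.floordiv_eq_iff_of_pos (by norm_num)]
    omega
  rw [isSidonB, hfd, beq_iff_eq,
    show PySem.Set.len (PySem.Set.ofList (sumListB S))
      = (((PySem.Set.ofList (sumListB S)).length : Nat) : Int) from rfl,
    ← length_ofList_eq_iff]
  exact ⟨fun h => by exact_mod_cast h, fun h => by exact_mod_cast h⟩

theorem is_sidon_eq (S : List Int) : is_sidon S = isSidonB S := by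
  rcases h : isSidonB S with _ | _
  · rcases h2 : is_sidon S with _ | _
    · rfl
    · exact absurd ((isSidonB_iff S).2 ((is_sidon_iff S).1 h2)) (by simp [h])
  · exact (is_sidon_iff S).2 ((isSidonB_iff S).1 h)

-- ===== the greedy constructions agree =====

theorem newSumsB_isSome (c : Int) (sums : PySem.Set Int) (xs : List Int) (new : PySem.Set Int) :
    (newSumsB c sums xs new).isSome = true ↔
      (xs.map (fun s => c + s)).Nodup ∧ ∀ y ∈ xs.map (fun s => c + s), y ∉ sums ∧ y ∉ new := by
  induction xs generalizing new with
  | nil => simp [newSumsB]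
  | cons s t ih =>
    rw [newSumsB]
    by_cases h1 : c + s ∈ sums
    · rw [if_pos (by rw [(PySem.Set.contains_iff sums (c + s)).2 h1]; simp)]
      simp only [Option.isSome_none, Bool.false_eq_true, false_iff, not_and, List.map_cons]
      intro _ h
      exact ((h (c + s) List.mem_cons_self).1) h1
    · by_cases h2 : c + s ∈ new
      · rw [if_pos (by rw [(PySem.Set.contains_iff new (c + s)).2 h2]; simp)]
        simp only [Option.isSome_none, Bool.false_eq_true, false_iff, not_and, List.map_cons]
        intro _ h
        exact ((h (c + s) List.mem_cons_self).2) h2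
      · have hc1 : sums.contains (c + s) = false := by
          rcases h : sums.contains (c + s)
          · rfl
          · exact absurd ((PySem.Set.contains_iff sums (c + s)).1 h) h1
        have hc2 : new.contains (c + s) = false := by
          rcases h : new.contains (c + s)
          · rfl
          · exact absurd ((PySem.Set.contains_iff new (c + s)).1 h) h2
        rw [hc1, hc2, if_neg (by simp), ih]
        simp only [List.map_cons, List.nodup_cons, List.mem_cons]
        constructor
        · rintro ⟨hnd, hmem⟩
          have hnt : c + s ∉ t.map (fun s => c + s) := fun hin =>
            ((hmem _ hin).2) ((PySem.Set.mem_add new (c + s) (c + s)).2 (Or.inr rfl))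
          refine ⟨⟨hnt, hnd⟩, ?_⟩
          rintro y (rfl | hy)
          · exact ⟨h1, h2⟩
          · refine ⟨(hmem y hy).1, fun hyn => (hmem y hy).2 ((PySem.Set.mem_add new (c + s) y).2 (Or.inl hyn))⟩
        · rintro ⟨⟨hnt, hnd⟩, hmem⟩
          refine ⟨hnd, fun y hy => ⟨(hmem y (Or.inr hy)).1, fun hya => ?_⟩⟩
          rcases (PySem.Set.mem_add new (c + s) y).1 hya with hyn | rfl
          · exact (hmem y (Or.inr hy)).2 hyn
          · exact hnt hy

theorem newSumsB_some_mem (c : Int) (sums : PySem.Set Int) (xs : List Int)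
    (new new' : PySem.Set Int) (h : newSumsB c sums xs new = some new') (y : Int) :
    y ∈ new' ↔ y ∈ new ∨ y ∈ xs.map (fun s => c + s) := by
  induction xs generalizing new with
  | nil =>
    rw [newSumsB, Option.some.injEq] at h
    subst h; simp
  | cons s t ih =>
    rw [newSumsB] at h
    split at h
    · exact absurd h (by simp)
    · rw [ih _ h, PySem.Set.mem_add]
      simp only [List.map_cons, List.mem_cons]
      tauto

-- loop invariant of the greedy construction
def GInv (S : List Int) (sums : PySem.Set Int) (gap : Int) : Prop :=
  S ≠ [] ∧ List.Pairwise (· < ·) S ∧ (∀ x ∈ S, 0 ≤ x) ∧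
  (sumListB S).Nodup ∧ (∀ t : Int, t ∈ sums ↔ t ∈ sumListB S) ∧
  1 ≤ gap ∧ gap ≤ max 1 (lastD S)

theorem lastD_concat (S : List Int) (c : Int) : lastD (S ++ [c]) = c := by
  rw [lastD, PySem.List.pyGet?, PySem.List.pyIdx?]
  rw [if_neg (by omega), if_pos (by
    simp only [List.length_append, List.length_cons, List.length_nil]; push_cast; omega)]
  rw [show ((S ++ [c]).length - (-(-1 : Int)).toNat) = S.length by simp]
  simp

theorem lastD_mem {S : List Int} (h : S ≠ []) : lastD S ∈ S := by
  induction S using List.reverseRecOn with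
  | nil => exact absurd rfl h
  | append_singleton t x _ =>
    rw [lastD_concat]
    exact List.mem_append_right _ (List.mem_singleton.2 rfl)

theorem le_lastD {S : List Int} (h : List.Pairwise (· < ·) S) {x : Int} (hx : x ∈ S) :
    x ≤ lastD S := by
  induction S using List.reverseRecOn with
  | nil => simp at hx
  | append_singleton T c _ =>
    rw [lastD_concat]
    have hp := h
    rcases List.mem_append.1 hx with hxT | hxc
    · exact le_of_lt ((List.pairwise_append.1 hp).2.2 x hxT c (List.mem_singleton.2 rfl))
    · rw [List.mem_singleton] at hxc; omega

-- A's Sidon test on S + [c] equals B's incremental test, given the invariant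
theorem test_eq {S : List Int} {sums : PySem.Set Int} {gap : Int}
    (hInv : GInv S sums gap) (c : Int) :
    is_sidon (S ++ [c]) = (newSumsB c sums (S ++ [c]) PySem.Set.empty).isSome := by
  obtain ⟨_, _, _, hnd, hmem, _, _⟩ := hInv
  rcases hB : (newSumsB c sums (S ++ [c]) PySem.Set.empty).isSome with _ | _
  · rcases hA : is_sidon (S ++ [c]) with _ | _
    · rfl
    · exfalso
      have h1 := (is_sidon_iff _).1 hA
      have h2 := (sumListB_append_singleton S c).nodup_iff.1 h1
      rcases List.nodup_append.1 h2 with ⟨_, hrow, hdisj⟩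
      have : (newSumsB c sums (S ++ [c]) PySem.Set.empty).isSome = true := by
        rw [newSumsB_isSome]
        refine ⟨hrow, fun y hy => ⟨fun hys => ?_, by simp [PySem.Set.empty]⟩⟩
        exact hdisj y ((hmem y).1 hys) y hy rfl
      rw [hB] at this; exact absurd this (by simp)
  · rw [(is_sidon_iff _).2]
    rw [newSumsB_isSome] at hB
    obtain ⟨hrow, hfresh⟩ := hB
    refine (sumListB_append_singleton S c).nodup_iff.2 (List.nodup_append.2 ⟨hnd, hrow, ?_⟩)
    intro a ha b hb
    rintro rfl
    exact ((hfresh a hb).1) ((hmem a).2 ha)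

-- any candidate above twice the last element passes A's test
theorem test_big {S : List Int} {sums : PySem.Set Int} {gap : Int}
    (hInv : GInv S sums gap) {c : Int} (hc : 2 * lastD S < c) :
    is_sidon (S ++ [c]) = true := by
  obtain ⟨hne, hch, hnn, hnd, _, _, _⟩ := hInv
  have hl0 : 0 ≤ lastD S := hnn _ (lastD_mem hne)
  have hub : ∀ x ∈ S, x ≤ lastD S := fun x hx => le_lastD hch hx
  rw [is_sidon_iff]
  refine (sumListB_append_singleton S c).nodup_iff.2 (List.nodup_append.2 ⟨hnd, ?_, ?_⟩)
  · refine List.Nodup.map (fun a b h => by omega) ?_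
    have hp : List.Pairwise (· < ·) (S ++ [c]) := by
      rw [List.pairwise_append]
      exact ⟨hch, List.pairwise_singleton _ _,
        fun a ha b hb => by rw [List.mem_singleton] at hb; subst hb; exact lt_of_le_of_lt (hub a ha) (by omega)⟩
    exact hp.imp ne_of_lt
  · intro a ha b hb
    rintro rfl
    rcases mem_sumListB ha with ⟨p, hp, q, hq, heqa⟩
    rcases List.mem_map.1 hb with ⟨s, hs, heq⟩
    have hs0 : 0 ≤ s := by
      rcases List.mem_append.1 hs with h | h
      · exact hnn s h
      · rw [List.mem_singleton] at h; omega
    have := hub p hp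
    have := hub q hq
    omega

theorem search_eq {S : List Int} {sums : PySem.Set Int} {gap : Int} (hInv : GInv S sums gap) :
    ∀ (m : Nat) (c : Int), lastD S < c → c ≤ 2 * lastD S + 1 →
      (2 * lastD S + 1 - c).toNat ≤ m →
    ∀ bound : Int, 2 * lastD S + 1 < bound →
      searchA S bound c = (searchB S sums bound c).1 ∧
      is_sidon (S ++ [searchA S bound c]) = true ∧
      lastD S < searchA S bound c ∧
      (∀ y : Int, y ∈ (searchB S sums bound c).2 ↔
        y ∈ (S ++ [searchA S bound c]).map (fun s => searchA S bound c + s)) := by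
  intro m
  induction m with
  | zero =>
    intro c hc1 hc2 hm bound hb
    have hceq : c = 2 * lastD S + 1 := by
      have hl0 : 0 ≤ lastD S := by
        obtain ⟨hne, _, hnn, _⟩ := hInv
        exact hnn _ (lastD_mem hne)
      omega
    have hA : is_sidon (S ++ [c]) = true := test_big hInv (by omega)
    have hB := (test_eq hInv c).symm.trans hA
    rcases hBs : newSumsB c sums (S ++ [c]) PySem.Set.empty with _ | new
    · rw [hBs] at hB; exact absurd hB (by simp)
    · rw [searchA, if_pos hA, searchB, hBs]
      refine ⟨rfl, hA, by omega, fun y => ?_⟩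
      rw [newSumsB_some_mem _ _ _ _ _ hBs]
      simp [PySem.Set.empty]
  | succ m ih =>
    intro c hc1 hc2 hm bound hb
    rcases hA : is_sidon (S ++ [c]) with _ | _
    · -- test fails: c ≤ 2 * lastD S, step to c + 1
      have hclow : c ≤ 2 * lastD S := by
        by_contra h
        rw [test_big hInv (by omega)] at hA
        exact absurd hA (by simp)
      have hB := (test_eq hInv c).symm.trans hA
      rcases hBs : newSumsB c sums (S ++ [c]) PySem.Set.empty with _ | new
      · rw [searchA, if_neg (by simp [hA]), if_neg (by omega), searchB, hBs,
          if_neg (by omega)]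
        exact ih (c + 1) (by omega) (by omega) (by omega) bound hb
      · rw [hBs] at hB; exact absurd hB (by simp)
    · have hB := (test_eq hInv c).symm.trans hA
      rcases hBs : newSumsB c sums (S ++ [c]) PySem.Set.empty with _ | new
      · rw [hBs] at hB; exact absurd hB (by simp)
      · rw [searchA, if_pos hA, searchB, hBs]
        refine ⟨rfl, hA, by omega, fun y => ?_⟩
        rw [newSumsB_some_mem _ _ _ _ _ hBs]
        simp [PySem.Set.empty]

theorem steps_eq : ∀ (n : Nat) (S : List Int) (sums : PySem.Set Int) (gap : Int),
    GInv S sums gap → stepsA n S gap = stepsB n S sums gap := by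
  intro n
  induction n with
  | zero => intros; rfl
  | succ n ih =>
    intro S sums gap hInv
    obtain ⟨hne, hch, hnn, hnd, hmem, hg1, hg2⟩ := hInv
    have hInv' : GInv S sums gap := ⟨hne, hch, hnn, hnd, hmem, hg1, hg2⟩
    have hl0 : 0 ≤ lastD S := hnn _ (lastD_mem hne)
    have hub : ∀ x ∈ S, x ≤ lastD S := fun x hx => le_lastD hch hx
    have hc2 : lastD S + gap ≤ 2 * lastD S + 1 := by
      rcases max_cases 1 (lastD S) with ⟨h1, h2⟩ | ⟨h1, h2⟩ <;> omega
    obtain ⟨heq, hsid, hclt, hmemnew⟩ :=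
      search_eq hInv' (2 * lastD S + 1 - (lastD S + gap)).toNat (lastD S + gap)
        (by omega) hc2 le_rfl (2 * lastD S + gap + 2) (by omega)
    simp only [stepsA, stepsB]
    rw [← heq]
    set c := searchA S (2 * lastD S + gap + 2) (lastD S + gap) with hcdef
    apply ih
    refine ⟨by simp, ?_, ?_, (is_sidon_iff _).1 hsid, ?_, by omega, ?_⟩
    · rw [List.pairwise_append]
      exact ⟨hch, List.pairwise_singleton _ _,
        fun a ha b hb => by
          rw [List.mem_singleton] at hb; subst hb
          exact lt_of_le_of_lt (hub a ha) hclt⟩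
    · intro x hx
      rcases List.mem_append.1 hx with h | h
      · exact hnn x h
      · rw [List.mem_singleton] at h; omega
    · intro t
      rw [PySem.Set.mem_union, hmem t, hmemnew t,
        (sumListB_append_singleton S c).mem_iff, List.mem_append]
    · rw [lastD_concat]
      rcases max_cases 1 (lastD S) with ⟨h1, h2⟩ | ⟨h1, h2⟩ <;>
        rcases max_cases 1 c with ⟨h3, h4⟩ | ⟨h3, h4⟩ <;>
        rcases max_cases gap c with ⟨h5, h6⟩ | ⟨h5, h6⟩ <;> omega

theorem greedy_eq (k : Int) : greedyA k = greedyB k := by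
  apply steps_eq
  refine ⟨by simp, by simp, ?_, ?_, ?_, le_refl 1, ?_⟩
  · intro x hx; rw [List.mem_singleton] at hx; omega
  · show (sumListB [0]).Nodup
    rw [show sumListB [0] = [0] from rfl]
    exact List.nodup_singleton 0
  · intro t
    exact PySem.Set.mem_ofList [0] t
  · exact le_max_left 1 (lastD [0])

theorem expLoop_eq (k : Int) (bases : List Int) : expLoopA k bases = expLoopB k bases := by
  induction bases with
  | nil =>
    rw [expLoopA, expLoopB]; exact greedy_eq k
  | cons b rest ih =>
    rw [expLoopA, expLoopB]
    simp only [is_sidon_eq]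
    split
    · rfl
    · exact ih

theorem superexp_list_eq {k : Int} (hk : 2 ≤ k) :
    ((PySem.List.pyRange 0 k).map (fun i => if 0 < i then (1000 : Int) ^ i.toNat else 0)).set 1 1
      = 0 :: 1 :: (PySem.List.pyRange 2 k).map (fun i => (1000 : Int) ^ i.toNat) := by
  rw [PySem.List.pyRange_one_cons (show (0 : Int) < k by omega),
    PySem.List.pyRange_one_cons (show (0 : Int) + 1 < k by omega),
    show (0 : Int) + 1 + 1 = 2 from by norm_num,
    List.map_cons, List.map_cons,
    show ∀ (a b : Int) (l : List Int), (a :: b :: l).set 1 1 = a :: 1 :: l from fun _ _ _ => rfl,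
    if_neg (lt_irrefl (0 : Int))]
  simp only [List.cons.injEq]
  refine ⟨trivial, trivial, ?_⟩
  refine List.map_congr_left fun i hi => ?_
  have h2 := PySem.List.mem_pyRange_one.1 hi
  rw [if_pos (by omega)]

-- ===== VERDICT (by name: the statement is the Claim_ definition above) =====
theorem make_spread_sidon_spec : Claim_equal_make_spread_sidon := by
  intro k spread _ hpre
  unfold Spec_make_spread_sidon make_spread_sidon make_spread_sidon_alt
  by_cases h1 : spread = "exponential"
  · rw [if_pos h1, if_pos h1]; exact expLoop_eq k _
  rw [if_neg h1, if_neg h1]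
  by_cases h2 : spread = "perfect"
  · rw [if_pos h2, if_pos h2]
    by_cases hk : 3 ≤ k ∧ k ≤ 7
    · obtain ⟨hk1, hk2⟩ := hk
      interval_cases k <;> decide
    · rw [if_neg hk]
      have hkn : knownA.get? k = none := by
        rw [show knownA = PySem.Dict.mk
            [(3, [0, 1, 3]), (4, [0, 1, 3, 7]), (5, [0, 1, 3, 7, 12]),
             (6, [0, 1, 3, 7, 12, 20]), (7, [0, 1, 3, 7, 12, 20, 30])] from rfl]
        simp only [PySem.Dict.get?_mk_cons, beq_iff_eq]
        rw [if_neg (by omega), if_neg (by omega), if_neg (by omega),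
          if_neg (by omega), if_neg (by omega)]
        rfl
      rw [hkn]
      exact greedy_eq k
  rw [if_neg h2, if_neg h2]
  by_cases h3 : spread = "quadratic"
  · rw [if_pos h3, if_pos h3]
    simp only [is_sidon_eq]
    split
    · rfl
    · exact greedy_eq k
  rw [if_neg h3, if_neg h3]
  by_cases h4 : spread = "superexp"
  · rw [if_pos h4, if_pos h4]
    have hk : 2 ≤ k := by
      rw [Pre_make_spread_sidon] at hpre
      by_contra h
      exact hpre ⟨h4, by omega⟩
    rw [if_pos hk]
    simp only [superexp_list_eq hk, is_sidon_eq]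
    split
    · rfl
    · exact greedy_eq k
  rw [if_neg h4, if_neg h4]
  exact greedy_eq k
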